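-- pv_equiv track=rewrite | github.com/alexkuzh/CW_Python | Python/7kyu/How many urinals are free.py | get_free_urinals
-- ===== SOURCE A (Python) =====
-- def get_free_urinals(s):
--     s = '10' + s + '01'
--     k = 0
--     p = False
--     sum = 0
--     for i in s:
--         if i == '0':
--             k += 1
--             p = False
--         else:
--             if p:
--                 sum = -1
--                 break
--             p = True
--             if k >= 3:
--                 sum += (k - 3) // 2 + 1
--             k = 0
--     return sum
-- ===== SOURCE B (Python) =====
-- def get_free_urinals(s):
--     # Greedy simulation: pad with walls, then seat people left-to-right at any
--     # stall whose both neighbours are free; -1 if two occupied stalls are adjacent.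
--     occ = [True, False] + [c != '0' for c in s] + [False, True]
--     if any(occ[i] and occ[i + 1] for i in range(len(occ) - 1)):
--         return -1
--     count = 0
--     for i in range(1, len(occ) - 1):
--         if not occ[i - 1] and not occ[i] and not occ[i + 1]:
--             occ[i] = True
--             count += 1
--     return count
-- ===== Notes on version B (the rewrite author's own statement) =====
-- stated objective: alternative
-- what changed: A's single stateful counting scan (gap counter k, flag p, closed-form increment per gap) is replaced by an actual greedy simulation: pad with walls, reject on any adjacent occupied pair, then seat people left-to-right by mutating the occupancy array whenever a stall and both neighbours are free, counting seats placed.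
import Mathlib
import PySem

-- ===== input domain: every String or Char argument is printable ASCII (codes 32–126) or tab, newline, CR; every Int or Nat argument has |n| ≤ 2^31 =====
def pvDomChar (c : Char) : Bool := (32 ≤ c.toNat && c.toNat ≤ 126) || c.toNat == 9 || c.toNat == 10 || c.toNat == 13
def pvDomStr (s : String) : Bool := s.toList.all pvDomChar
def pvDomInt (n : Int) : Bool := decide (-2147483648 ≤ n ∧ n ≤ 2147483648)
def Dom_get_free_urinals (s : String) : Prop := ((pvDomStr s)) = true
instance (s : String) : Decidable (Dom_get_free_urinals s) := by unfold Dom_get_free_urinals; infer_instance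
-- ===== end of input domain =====

-- B replaces A's stateful counting scan (gap counter k, flag p, closed-form increment per gap)
-- by an actual greedy simulation on a padded occupancy array: reject on an adjacent occupied
-- pair, then seat people left-to-right wherever a stall and both neighbours are free (alternative decomposition).

-- ===== PORT A =====
-- A's for-loop over the padded string '10'+s+'01' with state (k, p, sum); the break returns -1.
def pvLoopA : List Char → Int → Bool → Int → Int
  | [], _, _, sum => sum
  | c :: rest, k, p, sum =>
    if c = '0' then pvLoopA rest (k + 1) false sum
    else if p then -1
    else pvLoopA rest 0 true (if k ≥ 3 then sum + (PySem.Int.floordiv (k - 3) 2 + 1) else sum)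

def get_free_urinals (s : String) : Int :=
  pvLoopA ('1' :: '0' :: s.toList ++ ['0', '1']) 0 false 0

-- ===== PORT B =====
-- occ = [True, False] + [c != '0' for c in s] + [False, True]
def pvOcc (s : String) : List Bool :=
  true :: false :: (s.toList.map (fun c => decide (c ≠ '0')) ++ [false, true])

-- any(occ[i] and occ[i+1] for i in range(len(occ)-1))
def pvHasAdj : List Bool → Bool
  | a :: b :: r => (a && b) || pvHasAdj (b :: r)
  | _ => false

-- the seating loop over i in range(1, len(occ)-1): window (occ[i-1], occ[i], occ[i+1]);
-- the in-place mutation occ[i] = True is the 'true ::' in the recursive call.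
def pvSeat : List Bool → Int
  | a :: b :: c :: rest =>
      if !a && !b && !c then 1 + pvSeat (true :: c :: rest)
      else pvSeat (b :: c :: rest)
  | _ => 0
termination_by l => l.length

def get_free_urinals_alt (s : String) : Int :=
  if pvHasAdj (pvOcc s) then -1 else pvSeat (pvOcc s)

-- ===== PRECONDITION & SPEC =====
def Spec_get_free_urinals (s : String) (out : Int) : Prop := out = get_free_urinals_alt s
instance (s : String) (out : Int) : Decidable (Spec_get_free_urinals s out) := by unfold Spec_get_free_urinals; infer_instance

-- ===== CLAIM (what is proved, stated in full; the proofs are below) =====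
def Claim_equal_get_free_urinals : Prop := ∀ (s : String), Dom_get_free_urinals s → Spec_get_free_urinals s (get_free_urinals s)

-- ===== LEMMAS AND PROOFS =====

-- gap lengths of a char list given the current gap count k (final element = trailing gap)
def pvGaps : List Char → Int → List Int
  | [], k => [k]
  | c :: rest, k => if c = '0' then pvGaps rest (k + 1) else k :: pvGaps rest 0

-- A's per-gap accumulation step
def pvStep (acc r : Int) : Int := if r ≥ 3 then acc + (PySem.Int.floordiv (r - 3) 2 + 1) else acc

theorem pvLoopA_eq (l : List Char) :
    ∀ (k sum : Int), 0 ≤ k →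
    pvLoopA (l ++ ['0', '1']) k (decide (k = 0)) sum =
      (if (0 : Int) ∈ pvGaps (l ++ ['0']) k then -1
       else (pvGaps (l ++ ['0']) k).foldl pvStep sum) := by
  induction l with
  | nil =>
    intro k sum hk
    have hk1 : ¬ ((0 : Int) = k + 1) := by omega
    have h3 : pvLoopA (([] : List Char) ++ ['0', '1']) k (decide (k = 0)) sum
        = pvStep sum (k + 1) := by
      simp [pvLoopA, pvStep]
    rw [h3]
    simp [pvGaps, hk1]
  | cons c rest ih =>
    intro k sum hk
    by_cases h : c = '0'
    · have hk1 : (decide (k + 1 = 0)) = false := by simp; omega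
      have hstep : pvLoopA ((c :: rest) ++ ['0', '1']) k (decide (k = 0)) sum
          = pvLoopA (rest ++ ['0', '1']) (k + 1) (decide (k + 1 = 0)) sum := by
        rw [hk1]; simp [pvLoopA, h]
      rw [hstep, ih (k + 1) sum (by omega)]
      simp [pvGaps, h]
    · by_cases hk0 : k = 0
      · simp [pvLoopA, pvGaps, h, hk0]
      · have h0 : ¬ ((0 : Int) = k) := fun e => hk0 e.symm
        have hstep : pvLoopA ((c :: rest) ++ ['0', '1']) k (decide (k = 0)) sum
            = pvLoopA (rest ++ ['0', '1']) 0 (decide ((0 : Int) = 0)) (pvStep sum k) := by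
          simp [pvLoopA, h, hk0, pvStep]
        rw [hstep, ih 0 (pvStep sum k) le_rfl]
        simp [pvGaps, h, h0]

-- pvStep-specific shift of the fold's accumulator (pvStep is an if-guarded add)
theorem pvStep_shift (c r : Int) : pvStep c r = c + pvStep 0 r := by
  unfold pvStep; split_ifs <;> ring

theorem foldl_pvStep_shift (l : List Int) : ∀ c : Int, l.foldl pvStep c = c + l.foldl pvStep 0 := by
  induction l with
  | nil => intro c; simp
  | cons x t ih =>
    intro c
    simp only [List.foldl_cons]
    rw [ih (pvStep c x), ih (pvStep 0 x), pvStep_shift c x]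
    ring

-- A's closed-form gain on a positive gap equals the simulation's seat count (g+1 free stalls seat g/2 people beyond boundary rules)
theorem pvStep_val (k : Nat) : pvStep 0 ((k : Int) + 1) = ((k / 2 : Nat) : Int) := by
  unfold pvStep
  by_cases h : (3 : Int) ≤ (k : Int) + 1
  · rw [if_pos h, PySem.Int.floordiv_eq_ediv_of_pos (by norm_num)]
    omega
  · rw [if_neg h]
    omega

-- pvSeat ignores the stall before an occupied one
theorem pvSeat_indep (x : Bool) (t : List Bool) : pvSeat (x :: true :: t) = pvSeat (true :: t) := by
  cases t with
  | nil => simp [pvSeat]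
  | cons y r => simp [pvSeat]

-- greedy seats g/2 people in a run of g+1 free stalls closed by occupied ends
theorem pvSeat_run : ∀ (g : Nat) (t : List Bool),
    pvSeat (true :: (List.replicate (g + 1) false ++ (true :: t)))
      = ((g / 2 : Nat) : Int) + pvSeat (true :: t) := by
  intro g
  induction g using Nat.strong_induction_on with
  | _ g ih =>
    intro t
    match g with
    | 0 => simp [List.replicate, pvSeat, pvSeat_indep]
    | 1 => simp [List.replicate, pvSeat, pvSeat_indep]
    | (g' + 2) =>
      have h1 : List.replicate (g' + 3) false ++ (true :: t)
          = false :: false :: false :: (List.replicate g' false ++ (true :: t)) := by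
        simp [List.replicate]
      rw [h1]
      have hs : pvSeat (true :: false :: false :: false :: (List.replicate g' false ++ (true :: t)))
          = 1 + pvSeat (true :: false :: (List.replicate g' false ++ (true :: t))) := by
        simp [pvSeat]
      rw [hs]
      have h2 : true :: false :: (List.replicate g' false ++ (true :: t))
          = true :: (List.replicate (g' + 1) false ++ (true :: t)) := by
        simp [List.replicate]
      rw [h2, ih g' (by omega) t]
      push_cast
      omega

-- greedy over the whole padded array = A's fold over the gap lengths (no zero gap)
theorem pvSeat_main : ∀ (l : List Char) (k : Nat),
    ¬ ((0 : Int) ∈ pvGaps (l ++ ['0']) (k : Int)) →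
    pvSeat (true :: (List.replicate k false ++ (l.map (fun c => decide (c ≠ '0')) ++ [false, true])))
      = (pvGaps (l ++ ['0']) (k : Int)).foldl pvStep 0 := by
  intro l
  induction l with
  | nil =>
    intro k _
    have hl : List.replicate k false ++ (([] : List Char).map (fun c => decide (c ≠ '0')) ++ [false, true])
        = List.replicate (k + 1) false ++ (true :: []) := by
      simp [List.replicate_succ']
    have hg : pvGaps (([] : List Char) ++ ['0']) (k : Int) = [(k : Int) + 1] := by
      simp [pvGaps]
    rw [hl, pvSeat_run k [], hg]
    simp [pvSeat, pvStep_val k]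
  | cons c rest ih =>
    intro k hno
    by_cases h : c = '0'
    · have hg : pvGaps ((c :: rest) ++ ['0']) (k : Int) = pvGaps (rest ++ ['0']) ((k : Int) + 1) := by
        simp [pvGaps, h]
      have hl : List.replicate k false ++ ((c :: rest).map (fun c => decide (c ≠ '0')) ++ [false, true])
          = List.replicate (k + 1) false ++ (rest.map (fun c => decide (c ≠ '0')) ++ [false, true]) := by
        simp [h, List.replicate_succ']
      rw [hg] at hno ⊢
      rw [hl]
      have h2 := ih (k + 1) (by push_cast; exact hno)
      push_cast at h2
      exact h2
    · have hg : pvGaps ((c :: rest) ++ ['0']) (k : Int)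
          = (k : Int) :: pvGaps (rest ++ ['0']) 0 := by
        simp [pvGaps, h]
      rw [hg] at hno ⊢
      have hk0 : k ≠ 0 := by
        intro e; exact hno (by simp [e])
      obtain ⟨k', rfl⟩ : ∃ k', k = k' + 1 := ⟨k - 1, by omega⟩
      have hno' : ¬ ((0 : Int) ∈ pvGaps (rest ++ ['0']) 0) := by
        intro hm; exact hno (List.mem_cons_of_mem _ hm)
      have hl : List.replicate (k' + 1) false ++ ((c :: rest).map (fun c => decide (c ≠ '0')) ++ [false, true])
          = List.replicate (k' + 1) false ++ (true :: (rest.map (fun c => decide (c ≠ '0')) ++ [false, true])) := by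
        simp [h]
      rw [hl, pvSeat_run k' _]
      have hrec := ih 0 (by simpa using hno')
      simp only [List.replicate, List.nil_append, Nat.cast_zero] at hrec
      rw [hrec]
      have hfold : ((((k' : Nat) + 1 : Nat) : Int) :: pvGaps (rest ++ ['0']) 0).foldl pvStep 0
          = ((k' / 2 : Nat) : Int) + (pvGaps (rest ++ ['0']) 0).foldl pvStep 0 := by
        rw [List.foldl_cons,
            foldl_pvStep_shift (pvGaps (rest ++ ['0']) 0) (pvStep 0 (((k' : Nat) + 1 : Nat) : Int))]
        have : ((((k' : Nat) + 1 : Nat) : Int)) = (k' : Int) + 1 := by push_cast; ring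
        rw [this, pvStep_val k']
      rw [hfold]

-- the adjacency check fires exactly on a zero gap
theorem pvHasAdj_eq : ∀ (l : List Char) (k : Nat),
    pvHasAdj (((k == 0 : Bool)) :: (l.map (fun c => decide (c ≠ '0')) ++ [false, true]))
      = decide ((0 : Int) ∈ pvGaps (l ++ ['0']) (k : Int)) := by
  intro l
  induction l with
  | nil =>
    intro k
    have : ¬ ((0 : Int) = (k : Int) + 1) := by omega
    simp [pvHasAdj, pvGaps, this]
  | cons c rest ih =>
    intro k
    by_cases h : c = '0'
    · have hmap : (c :: rest).map (fun c => decide (c ≠ '0'))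
          = false :: rest.map (fun c => decide (c ≠ '0')) := by simp [h]
      have hstep : pvHasAdj (((k == 0 : Bool)) :: ((false :: rest.map (fun c => decide (c ≠ '0'))) ++ [false, true]))
          = pvHasAdj ((((k + 1 : Nat) == 0 : Bool)) :: (rest.map (fun c => decide (c ≠ '0')) ++ [false, true])) := by
        have h0 : (((k + 1 : Nat) == 0 : Bool)) = false := by simp
        rw [h0]
        simp [pvHasAdj]
      have hg : pvGaps ((c :: rest) ++ ['0']) (k : Int) = pvGaps (rest ++ ['0']) ((k : Int) + 1) := by
        simp [pvGaps, h]
      rw [hmap, hstep, ih (k + 1), hg]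
      push_cast
      rfl
    · have hmap : (c :: rest).map (fun c => decide (c ≠ '0'))
          = true :: rest.map (fun c => decide (c ≠ '0')) := by simp [h]
      have hstep : pvHasAdj (((k == 0 : Bool)) :: ((true :: rest.map (fun c => decide (c ≠ '0'))) ++ [false, true]))
          = (((k == 0 : Bool)) || pvHasAdj ((((0 : Nat) == 0 : Bool)) :: (rest.map (fun c => decide (c ≠ '0')) ++ [false, true]))) := by
        simp [pvHasAdj]
      have hg : pvGaps ((c :: rest) ++ ['0']) (k : Int)
          = (k : Int) :: pvGaps (rest ++ ['0']) 0 := by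
        simp [pvGaps, h]
      rw [hmap, hstep, ih 0, hg]
      have hk : ((k == 0 : Bool)) = decide ((0 : Int) = (k : Int)) := by
        by_cases e : k = 0
        · simp [e]
        · have hne : ¬ ((0 : Int) = (k : Int)) := by omega
          simp [e, hne]
      rw [hk]
      push_cast
      simp [List.mem_cons]

theorem ports_agree (s : String) : get_free_urinals s = get_free_urinals_alt s := by
  unfold get_free_urinals get_free_urinals_alt
  have hA : pvLoopA ('1' :: '0' :: s.toList ++ ['0', '1']) 0 false 0
      = pvLoopA (s.toList ++ ['0', '1']) 1 (decide ((1 : Int) = 0)) 0 := by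
    simp [pvLoopA]
  rw [hA, pvLoopA_eq s.toList 1 0 (by omega)]
  have hOcc : pvOcc s
      = true :: (((1 : Nat) == 0 : Bool)) :: (s.toList.map (fun c => decide (c ≠ '0')) ++ [false, true]) := by
    simp [pvOcc]
  have hAdj : pvHasAdj (pvOcc s) = decide ((0 : Int) ∈ pvGaps (s.toList ++ ['0']) 1) := by
    rw [hOcc]
    have : pvHasAdj (true :: (((1 : Nat) == 0 : Bool)) :: (s.toList.map (fun c => decide (c ≠ '0')) ++ [false, true]))
        = pvHasAdj ((((1 : Nat) == 0 : Bool)) :: (s.toList.map (fun c => decide (c ≠ '0')) ++ [false, true])) := by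
      simp [pvHasAdj]
    rw [this, pvHasAdj_eq s.toList 1]
    norm_num
  by_cases hm : (0 : Int) ∈ pvGaps (s.toList ++ ['0']) 1
  · rw [if_pos hm]
    have : pvHasAdj (pvOcc s) = true := by rw [hAdj]; simpa using hm
    rw [this]; simp
  · rw [if_neg hm]
    have hadj : pvHasAdj (pvOcc s) = false := by rw [hAdj]; simpa using hm
    rw [hadj]
    simp only [Bool.false_eq_true, if_false]
    have hOcc2 : pvOcc s
        = true :: (List.replicate 1 false ++ (s.toList.map (fun c => decide (c ≠ '0')) ++ [false, true])) := by
      simp [pvOcc, List.replicate]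
    rw [hOcc2, pvSeat_main s.toList 1 (by simpa using hm)]
    norm_num

-- ===== VERDICT (by name: the statement is the Claim_ definition above) =====
theorem get_free_urinals_spec : Claim_equal_get_free_urinals := by
  intro s _
  unfold Spec_get_free_urinals
  exact (ports_agree s)
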